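-- pv_equiv track=rewrite | github.com/samduanx/mujica_f1_modeler | src/simulation/report_generator.py | generate_pit_stop_analysis
-- ===== SOURCE A (Python) =====
-- from typing import Dict, List, Optional, Any
-- from collections import defaultdict
--
-- def generate_pit_stop_analysis(race_results: List[Dict[str, Any]]) -> str:
--     """Generate pit stop analysis section."""
--     lines = ["## Pit Stop Analysis\n"]
--
--     # Group by number of pit stops
--     pit_counts = defaultdict(int)
--     for result in race_results:
--         pits = result.get("num_pits", "0")
--         try:
--             pit_counts[int(pits)] += 1
--         except ValueError:
--             pass
--
--     lines.append("### Pit Stop Distribution\n")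
--     lines.append("| Number of Stops | Count |")
--     lines.append("|-----------------|-------|")
--
--     for num_stops in sorted(pit_counts.keys()):
--         lines.append(f"| {num_stops} | {pit_counts[num_stops]} |")
--
--     lines.append("")
--     return "\n".join(lines)
-- ===== SOURCE B (Python) =====
-- def generate_pit_stop_analysis(race_results):
--     """Generate pit stop analysis section."""
--     # Collect the parsed pit counts, sort them, then emit one row per run of
--     # adjacent equal values (sort-then-group instead of hash-count-then-sort).
--     pit_list = []
--     for result in race_results:
--         pits = result.get("num_pits", "0")
--         try:
--             pit_list.append(int(pits))
--         except ValueError: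
--             pass
--     pit_list.sort()
--     rows = []
--     i = 0
--     n = len(pit_list)
--     while i < n:
--         j = i + 1
--         while j < n and pit_list[j] == pit_list[i]:
--             j += 1
--         rows.append(f"| {pit_list[i]} | {j - i} |")
--         i = j
--     return "\n".join(
--         ["## Pit Stop Analysis\n",
--          "### Pit Stop Distribution\n",
--          "| Number of Stops | Count |",
--          "|-----------------|-------|"]
--         + rows + [""])
-- ===== Notes on version B (the rewrite author's own statement) =====
-- stated objective: alternative
-- what changed: Replaces the defaultdict hash-count followed by sorting the keys with collecting the parsed pit counts into a list, sorting the whole list, and emitting one row per run of adjacent equal values in a single scan.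
import Mathlib
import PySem

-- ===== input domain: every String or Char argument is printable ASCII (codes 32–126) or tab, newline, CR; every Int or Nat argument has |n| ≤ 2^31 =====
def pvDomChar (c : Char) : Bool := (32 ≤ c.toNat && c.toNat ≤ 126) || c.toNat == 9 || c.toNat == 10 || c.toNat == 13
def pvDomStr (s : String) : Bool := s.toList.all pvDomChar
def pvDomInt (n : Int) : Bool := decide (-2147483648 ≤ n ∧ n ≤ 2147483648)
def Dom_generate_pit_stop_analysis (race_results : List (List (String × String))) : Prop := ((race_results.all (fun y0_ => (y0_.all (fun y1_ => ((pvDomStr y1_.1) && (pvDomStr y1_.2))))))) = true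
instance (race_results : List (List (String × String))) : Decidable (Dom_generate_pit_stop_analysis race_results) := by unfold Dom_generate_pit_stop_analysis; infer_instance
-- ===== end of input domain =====

-- B builds a sorted list and groups adjacent equal values instead of A's hash-count-then-sort-keys; alternative decomposition, same results.

-- ===== PORT A =====
-- the f-string "| {num_stops} | {count} |" (identical in A and B)
def pvRow (k c : Int) : String :=
  "| " ++ PySem.Int.toStr k ++ " | " ++ PySem.Int.toStr c ++ " |"

def generate_pit_stop_analysis (race_results : List (List (String × String))) : String :=
  let lines : List String := ["## Pit Stop Analysis\n"]
  let pit_counts : PySem.Dict Int Int :=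
    race_results.foldl (fun d result =>
      match PySem.Int.ofStr? ((PySem.Dict.mk result).getD "num_pits" "0") with
      | some n => d.modify n 0 (· + 1)
      | none => d) PySem.Dict.empty
  let lines := lines ++ ["### Pit Stop Distribution\n", "| Number of Stops | Count |", "|-----------------|-------|"]
  let lines := lines ++ (PySem.List.sorted pit_counts.keys (fun k => k) false).map
      (fun num_stops => pvRow num_stops (pit_counts.getD num_stops 0))
  let lines := lines ++ [""]
  PySem.Str.join "\n" lines

-- ===== PORT B =====
-- the collecting loop of Source B
def pvCollect (race_results : List (List (String × String))) : List Int :=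
  race_results.foldl (fun acc result =>
    match PySem.Int.ofStr? ((PySem.Dict.mk result).getD "num_pits" "0") with
    | some n => acc ++ [n]
    | none => acc) []

-- Source B's nested while loops: the inner while advances j over the run of values
-- equal to pit_list[i] (= takeWhile on the tail), the outer while resumes at j.
def pvRuns : List Int → List String
  | [] => []
  | x :: t =>
    pvRow x ((t.takeWhile (fun y => y == x)).length + 1) :: pvRuns (t.dropWhile (fun y => y == x))
termination_by l => l.length
decreasing_by
  exact Nat.lt_succ_of_le (List.length_dropWhile_le _ _)

def generate_pit_stop_analysis_alt (race_results : List (List (String × String))) : String :=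
  let pit_list := PySem.List.sorted (pvCollect race_results) (fun x => x) false
  let rows := pvRuns pit_list
  PySem.Str.join "\n"
    (["## Pit Stop Analysis\n",
      "### Pit Stop Distribution\n",
      "| Number of Stops | Count |",
      "|-----------------|-------|"]
     ++ rows ++ [""])

-- ===== PRECONDITION & SPEC =====
def Spec_generate_pit_stop_analysis (race_results : List (List (String × String))) (out : String) : Prop := out = generate_pit_stop_analysis_alt race_results
instance (race_results : List (List (String × String))) (out : String) : Decidable (Spec_generate_pit_stop_analysis race_results out) := by unfold Spec_generate_pit_stop_analysis; infer_instance

-- ===== CLAIM (what is proved, stated in full; the proofs are below) =====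
def Claim_equal_generate_pit_stop_analysis : Prop := ∀ (race_results : List (List (String × String))), Dom_generate_pit_stop_analysis race_results → Spec_generate_pit_stop_analysis race_results (generate_pit_stop_analysis race_results)

-- ===== LEMMAS AND PROOFS =====


-- collecting fold with any accumulator
theorem pv_collect_acc (rs : List (List (String × String))) :
    ∀ acc : List Int,
      rs.foldl (fun acc result =>
        match PySem.Int.ofStr? ((PySem.Dict.mk result).getD "num_pits" "0") with
        | some n => acc ++ [n]
        | none => acc) acc
      = acc ++ rs.foldl (fun acc result =>
        match PySem.Int.ofStr? ((PySem.Dict.mk result).getD "num_pits" "0") with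
        | some n => acc ++ [n]
        | none => acc) [] := by
  induction rs with
  | nil => intro acc; simp
  | cons r rs ih =>
    intro acc
    simp only [List.foldl_cons]
    cases h : PySem.Int.ofStr? ((PySem.Dict.mk r).getD "num_pits" "0") with
    | none => simp only; exact ih acc
    | some n =>
      simp only [List.nil_append]
      rw [ih (acc ++ [n]), ih [n], List.append_assoc]

-- A's fold from any dict = counting fold of B's collected list from that dict
theorem pv_fold_pair (rs : List (List (String × String))) :
    ∀ d : PySem.Dict Int Int,
      rs.foldl (fun d result =>
        match PySem.Int.ofStr? ((PySem.Dict.mk result).getD "num_pits" "0") with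
        | some n => d.modify n 0 (· + 1)
        | none => d) d
      = (rs.foldl (fun acc result =>
          match PySem.Int.ofStr? ((PySem.Dict.mk result).getD "num_pits" "0") with
          | some n => acc ++ [n]
          | none => acc) []).foldl (fun d x => d.modify x 0 (· + 1)) d := by
  induction rs with
  | nil => intro d; rfl
  | cons r rs ih =>
    intro d
    simp only [List.foldl_cons]
    cases h : PySem.Int.ofStr? ((PySem.Dict.mk r).getD "num_pits" "0") with
    | none => simp only; exact ih d
    | some n =>
      simp only [List.nil_append]
      rw [ih, pv_collect_acc rs [n], List.foldl_append]
      rfl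

-- A's counting fold is the counter of B's collected list
theorem pv_foldA_eq_counter (race_results : List (List (String × String))) :
    (race_results.foldl (fun d result =>
      match PySem.Int.ofStr? ((PySem.Dict.mk result).getD "num_pits" "0") with
      | some n => d.modify n 0 (· + 1)
      | none => d) (PySem.Dict.empty : PySem.Dict Int Int))
    = PySem.Dict.counter (pvCollect race_results) := by
  rw [PySem.Dict.counter_eq_foldl]
  unfold pvCollect
  exact pv_fold_pair race_results PySem.Dict.empty

-- head of a dropWhile fails the predicate
theorem pv_dropWhile_head_false (p : Int → Bool) :
    ∀ (l : List Int) (b : Int) (rest : List Int), l.dropWhile p = b :: rest → p b = false := by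
  intro l
  induction l with
  | nil => intro b rest h; simp [List.dropWhile] at h
  | cons a l ih =>
    intro b rest h
    by_cases hp : p a
    · simp [List.dropWhile, hp] at h; exact ih b rest h
    · simp [List.dropWhile, hp] at h
      rw [← h.1]; simpa using hp

-- runs of a weakly increasing list = one row per distinct value, with its count
theorem pvRuns_sorted (l : List Int) : l.Pairwise (· ≤ ·) →
    pvRuns l = (PySem.List.sorted (PySem.Set.ofList l) (fun k => k) false).map
      (fun k => pvRow k (l.count k)) := by
  induction l using pvRuns.induct with
  | case1 =>
    intro _
    rw [pvRuns]
    rfl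
  | case2 x t ih =>
    intro hp
    have hx : ∀ y ∈ t, x ≤ y := (List.pairwise_cons.mp hp).1
    have ht : t.Pairwise (· ≤ ·) := (List.pairwise_cons.mp hp).2
    have hsplit : t.takeWhile (fun y => y == x) ++ t.dropWhile (fun y => y == x) = t :=
      List.takeWhile_append_dropWhile
    have hrun : ∀ y ∈ t.takeWhile (fun y => y == x), y = x :=
      fun y hy => eq_of_beq (List.mem_takeWhile_imp (p := fun y => y == x) (l := t) hy)
    have hrestpw : (t.dropWhile (fun y => y == x)).Pairwise (· ≤ ·) :=
      ht.sublist (List.dropWhile_sublist _)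
    have hrest : ∀ y ∈ t.dropWhile (fun y => y == x), x < y := by
      cases hdw : t.dropWhile (fun y => y == x) with
      | nil => intro y hy; simp at hy
      | cons r0 r' =>
        have hr0f : (r0 == x) = false := pv_dropWhile_head_false _ t r0 r' hdw
        have hr0t : r0 ∈ t :=
          (List.dropWhile_sublist _).subset (hdw ▸ List.mem_cons_self)
        have hxr0 : x < r0 :=
          lt_of_le_of_ne (hx r0 hr0t) (fun e => by simp [← e] at hr0f)
        have hpw : (r0 :: r').Pairwise (· ≤ ·) := hdw ▸ hrestpw
        intro y hy
        rcases List.mem_cons.mp hy with rfl | hy'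
        · exact hxr0
        · exact lt_of_lt_of_le hxr0 ((List.pairwise_cons.mp hpw).1 y hy')
    have hxnotrest : x ∉ t.dropWhile (fun y => y == x) :=
      fun h => lt_irrefl x (hrest x h)
    have hcount1 : t.count x = (t.takeWhile (fun y => y == x)).length := by
      conv_lhs => rw [← hsplit]
      rw [List.count_append, List.count_eq_length.mpr (fun b hb => (hrun b hb).symm),
        List.count_eq_zero.mpr hxnotrest]
      omega
    have hcountx : (x :: t).count x = (t.takeWhile (fun y => y == x)).length + 1 := by
      rw [List.count_cons_self, hcount1]
    have hcountk : ∀ k ∈ t.dropWhile (fun y => y == x),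
        (x :: t).count k = (t.dropWhile (fun y => y == x)).count k := by
      intro k hk
      have hkx : k ≠ x := fun e => lt_irrefl x (e ▸ hrest k hk)
      have h2 : List.count k t = List.count k (t.dropWhile (fun y => y == x)) := by
        conv_lhs => rw [← hsplit]
        rw [List.count_append, List.count_eq_zero.mpr (fun hmem => hkx (hrun k hmem)),
          Nat.zero_add]
      rw [List.count_cons]
      simp only [beq_iff_eq]
      rw [if_neg (fun e => hkx e.symm), Nat.add_zero]
      exact h2
    have hS : PySem.List.sorted (PySem.Set.ofList (x :: t)) (fun k => k) false
        = x :: PySem.List.sorted (PySem.Set.ofList (t.dropWhile (fun y => y == x))) (fun k => k) false := by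
      apply PySem.List.sorted_eq_of_perm_of_pairwise_lt
      · have hnd : (x :: PySem.List.sorted (PySem.Set.ofList (t.dropWhile (fun y => y == x))) (fun k => k) false).Nodup := by
          refine List.nodup_cons.mpr ⟨?_, ?_⟩
          · intro hmem
            rw [PySem.List.mem_sorted, PySem.Set.mem_ofList] at hmem
            exact hxnotrest hmem
          · exact ((PySem.List.sorted_perm _ _ _).nodup_iff).mpr (PySem.Set.nodup_ofList _)
        rw [List.perm_ext_iff_of_nodup hnd (PySem.Set.nodup_ofList _)]
        intro a
        simp only [List.mem_cons, PySem.List.mem_sorted, PySem.Set.mem_ofList]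
        constructor
        · rintro (rfl | ha)
          · exact Or.inl rfl
          · exact Or.inr ((List.dropWhile_sublist _).subset ha)
        · rintro (rfl | ha)
          · exact Or.inl rfl
          · rw [← hsplit] at ha
            rcases List.mem_append.mp ha with h1 | h2
            · exact Or.inl (hrun a h1)
            · exact Or.inr h2
      · refine List.pairwise_cons.mpr ⟨?_, ?_⟩
        · intro b hb
          rw [PySem.List.mem_sorted, PySem.Set.mem_ofList] at hb
          exact hrest b hb
        · exact PySem.List.sorted_ofList_pairwise_lt _
    rw [pvRuns, hS, List.map_cons]
    congr 1
    · refine congrArg _ ?_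
      rw [hcountx]; push_cast; ring
    · rw [ih hrestpw]
      refine (List.map_congr_left ?_).symm
      intro a ha
      rw [PySem.List.mem_sorted, PySem.Set.mem_ofList] at ha
      rw [hcountk a ha]

-- ===== VERDICT (by name: the statement is the Claim_ definition above) =====
theorem generate_pit_stop_analysis_spec : Claim_equal_generate_pit_stop_analysis := by
  intro rr _
  unfold Spec_generate_pit_stop_analysis generate_pit_stop_analysis generate_pit_stop_analysis_alt
  simp only [pv_foldA_eq_counter, PySem.Dict.keys_counter, PySem.Dict.getD_counter]
  have hpw : (PySem.List.sorted (pvCollect rr) (fun x => x) false).Pairwise (· ≤ ·) :=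
    PySem.List.sorted_pairwise _ _
  rw [pvRuns_sorted _ hpw]
  have hperm : (PySem.List.sorted (pvCollect rr) (fun x => x) false).Perm (pvCollect rr) :=
    PySem.List.sorted_perm _ _ _
  have hofperm : (PySem.Set.ofList (PySem.List.sorted (pvCollect rr) (fun x => x) false)).Perm
      (PySem.Set.ofList (pvCollect rr)) := by
    rw [List.perm_ext_iff_of_nodup (PySem.Set.nodup_ofList _) (PySem.Set.nodup_ofList _)]
    intro a
    simp only [PySem.Set.mem_ofList]
    exact hperm.mem_iff
  have hsorted : PySem.List.sorted
      (PySem.Set.ofList (PySem.List.sorted (pvCollect rr) (fun x => x) false)) (fun k => k) false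
      = PySem.List.sorted (PySem.Set.ofList (pvCollect rr)) (fun k => k) false :=
    PySem.List.sorted_eq_sorted_of_perm _ _ _ (fun _ _ e => e) hofperm
  rw [hsorted]
  simp only [hperm.count_eq]
  simp only [List.cons_append, List.nil_append]
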